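-- pv_equiv track=rewrite | github.com/steven-kld/invoice-payload | invoice_payload.py | get_leading_type
-- ===== SOURCE A (Python) =====
-- def get_leading_type(group):
--     for item in group:
--         if item.get("document_type") == "proforma":
--             return "proforma"
--     for item in group:
--         if item.get("document_type") == "summary":
--             return "summary"
--     return "invoice"
-- ===== SOURCE B (Python) =====
-- RANK = {"proforma": 2, "summary": 1}
-- NAMES = ["invoice", "summary", "proforma"]
--
-- def get_leading_type(group):
--     best = 0
--     for item in group:
--         best = max(best, RANK.get(item.get("document_type"), 0))
--     return NAMES[best]
-- ===== Notes on version B (the rewrite author's own statement) =====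
-- stated objective: alternative
-- what changed: B replaces A's two ordered early-return scans with a single pass that folds a numeric priority rank (proforma=2, summary=1, other=0) into a running maximum and then decodes the result by table lookup.
import Mathlib
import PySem

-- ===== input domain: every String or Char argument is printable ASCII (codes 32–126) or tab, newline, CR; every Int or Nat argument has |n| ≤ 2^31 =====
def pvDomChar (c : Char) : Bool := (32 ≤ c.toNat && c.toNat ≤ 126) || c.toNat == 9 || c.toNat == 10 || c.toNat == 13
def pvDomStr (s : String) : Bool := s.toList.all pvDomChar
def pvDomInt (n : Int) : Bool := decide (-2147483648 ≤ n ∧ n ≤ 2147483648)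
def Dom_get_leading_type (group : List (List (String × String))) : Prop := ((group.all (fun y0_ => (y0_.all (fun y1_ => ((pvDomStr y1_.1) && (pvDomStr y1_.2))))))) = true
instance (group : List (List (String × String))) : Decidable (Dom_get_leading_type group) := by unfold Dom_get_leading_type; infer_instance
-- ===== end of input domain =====

-- B replaces A's two ordered early-return scans with a single pass folding a numeric
-- priority rank into a running maximum, decoded by table lookup (objective: alternative).

-- ===== PORT A =====
def get_leading_type (group : List (List (String × String))) : String :=
  match group.find? (fun item => PySem.Dict.get? (PySem.Dict.mk item) "document_type" == some "proforma") with
  | some _ => "proforma"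
  | none =>
    match group.find? (fun item => PySem.Dict.get? (PySem.Dict.mk item) "document_type" == some "summary") with
    | some _ => "summary"
    | none => "invoice"

-- ===== PORT B =====
-- RANK = {"proforma": 2, "summary": 1}  (keyed by Option String since item.get may be None)
def pvRankDict : PySem.Dict (Option String) Int :=
  PySem.Dict.mk [(some "proforma", 2), (some "summary", 1)]

def pvNames : List String := ["invoice", "summary", "proforma"]

def get_leading_type_alt (group : List (List (String × String))) : String :=
  let best : Int := group.foldl
    (fun best item =>
      max best (PySem.Dict.getD pvRankDict (PySem.Dict.get? (PySem.Dict.mk item) "document_type") 0))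
    0
  -- NAMES[best]; best is always 0, 1 or 2 (proved below), so the default is never used
  (PySem.List.pyGet? pvNames best).getD ""

-- ===== PRECONDITION & SPEC =====
def Spec_get_leading_type (group : List (List (String × String))) (out : String) : Prop := out = get_leading_type_alt group
instance (group : List (List (String × String))) (out : String) : Decidable (Spec_get_leading_type group out) := by unfold Spec_get_leading_type; infer_instance

-- ===== CLAIM (what is proved, stated in full; the proofs are below) =====
def Claim_equal_get_leading_type : Prop := ∀ (group : List (List (String × String))), Dom_get_leading_type group → Spec_get_leading_type group (get_leading_type group)

-- ===== LEMMAS AND PROOFS =====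

-- the rank of one item
def pvRank (item : List (String × String)) : Int :=
  PySem.Dict.getD pvRankDict (PySem.Dict.get? (PySem.Dict.mk item) "document_type") 0

theorem pvRank_cases (item : List (String × String)) :
    pvRank item = if PySem.Dict.get? (PySem.Dict.mk item) "document_type" = some "proforma" then 2
      else if PySem.Dict.get? (PySem.Dict.mk item) "document_type" = some "summary" then 1 else 0 := by
  unfold pvRank pvRankDict
  rcases PySem.Dict.get? (PySem.Dict.mk item) "document_type" with _ | v
  · simp [PySem.Dict.getD, PySem.Dict.get?, PySem.Dict.mk]
  · by_cases hp : v = "proforma"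
    · simp [hp, PySem.Dict.getD, PySem.Dict.get?, PySem.Dict.mk]
    · by_cases hs : v = "summary"
      · simp [hp, hs, PySem.Dict.getD, PySem.Dict.get?, PySem.Dict.mk]
      · have h1 : ((some "proforma" : Option String) == some v) = false := by
          simp [Ne.symm hp]
        have h2 : ((some "summary" : Option String) == some v) = false := by
          simp [Ne.symm hs]
        simp [PySem.Dict.getD, PySem.Dict.get?, PySem.Dict.mk, List.find?_cons, h1, h2, hp, hs]

theorem pvRank_nonneg (item : List (String × String)) : 0 ≤ pvRank item := by
  rw [pvRank_cases]; split_ifs <;> norm_num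

theorem foldl_max_out (l : List (List (String × String))) (b : Int) (hb : 0 ≤ b) :
    l.foldl (fun best item => max best (pvRank item)) b
      = max b (l.foldl (fun best item => max best (pvRank item)) 0) := by
  induction l generalizing b with
  | nil => simpa using (max_eq_left hb).symm
  | cons a t ih =>
    have hr := pvRank_nonneg a
    simp only [List.foldl_cons]
    rw [ih (max b (pvRank a)) (le_trans hb (le_max_left _ _)),
        ih (max 0 (pvRank a)) (le_max_left _ _)]
    omega

theorem loop_char (l : List (List (String × String))) :
    l.foldl (fun best item => max best (pvRank item)) 0
      = if ∃ i ∈ l, PySem.Dict.get? (PySem.Dict.mk i) "document_type" = some "proforma" then 2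
        else if ∃ i ∈ l, PySem.Dict.get? (PySem.Dict.mk i) "document_type" = some "summary" then 1
        else 0 := by
  induction l with
  | nil => simp
  | cons a t ih =>
    simp only [List.foldl_cons]
    rw [foldl_max_out _ _ (le_max_left _ _), ih, pvRank_cases]
    have hr := pvRank_nonneg a
    by_cases hp : PySem.Dict.get? (PySem.Dict.mk a) "document_type" = some "proforma" <;>
      by_cases hs : PySem.Dict.get? (PySem.Dict.mk a) "document_type" = some "summary" <;>
        simp [hp, hs] <;> split_ifs <;> simp

theorem find?_none_iff (l : List (List (String × String))) (v : String) :
    l.find? (fun item => PySem.Dict.get? (PySem.Dict.mk item) "document_type" == some v) = none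
    ↔ ¬ ∃ i ∈ l, PySem.Dict.get? (PySem.Dict.mk i) "document_type" = some v := by
  rw [List.find?_eq_none]
  constructor
  · rintro h ⟨i, hi, he⟩; exact absurd (beq_iff_eq.mpr he) (by simpa using h i hi)
  · intro h i hi; by_contra hb
    exact h ⟨i, hi, beq_iff_eq.mp (by simpa using hb)⟩

theorem get_leading_type_spec : Claim_equal_get_leading_type := by
  intro group _
  unfold Spec_get_leading_type get_leading_type get_leading_type_alt
  show _ = (PySem.List.pyGet? pvNames
    (group.foldl (fun best item => max best (pvRank item)) 0)).getD ""
  rw [loop_char]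
  rcases hp : group.find? (fun item => PySem.Dict.get? (PySem.Dict.mk item) "document_type" == some "proforma") with _ | ip
  · have hnp := (find?_none_iff group "proforma").mp hp
    rcases hs : group.find? (fun item => PySem.Dict.get? (PySem.Dict.mk item) "document_type" == some "summary") with _ | is
    · have hns := (find?_none_iff group "summary").mp hs
      simp [hnp, hns, pvNames, PySem.List.pyGet?, PySem.List.pyIdx?]
    · have hes : ∃ i ∈ group, PySem.Dict.get? (PySem.Dict.mk i) "document_type" = some "summary" :=
        ⟨is, List.mem_of_find?_eq_some hs, beq_iff_eq.mp (by simpa using List.find?_some hs)⟩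
      simp [hnp, hes, pvNames, PySem.List.pyGet?, PySem.List.pyIdx?]
  · have hep : ∃ i ∈ group, PySem.Dict.get? (PySem.Dict.mk i) "document_type" = some "proforma" :=
      ⟨ip, List.mem_of_find?_eq_some hp, beq_iff_eq.mp (by simpa using List.find?_some hp)⟩
    simp [hep, pvNames, PySem.List.pyGet?, PySem.List.pyIdx?]
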